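-- pv_equiv track=rewrite | github.com/k-harada/AtCoder | ADT/20250525/C.py | solve
-- ===== SOURCE A (Python) =====
-- def solve(s):
--     if len(s) % 2 == 1:
--         return "No"
--     m = len(s) // 2
--     for i in range(m):
--         if s[2 * i] != s[2 * i + 1]:
--             return "No"
--     odd_set = set(s[::2])
--     if len(odd_set) < m:
--         return "No"
--     return "Yes"
-- ===== SOURCE B (Python) =====
-- def solve(s):
--     if len(s) % 2 == 1:
--         return "No"
--     reps = []
--     it = iter(s)
--     for a, b in zip(it, it):
--         if a != b:
--             return "No"
--         reps.append(a)
--     reps.sort()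
--     for x, y in zip(reps, reps[1:]):
--         if x == y:
--             return "No"
--     return "Yes"
-- ===== Notes on version B (the rewrite author's own statement) =====
-- stated objective: alternative
-- what changed: Distinctness of the pair representatives is detected by sorting them and scanning for an adjacent equal pair instead of building a set and comparing its size to len(s)//2; the pair-equality check walks the string two characters at a time via zip(it, it) instead of indexing s[2*i] for i in range(m).
import Mathlib
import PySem

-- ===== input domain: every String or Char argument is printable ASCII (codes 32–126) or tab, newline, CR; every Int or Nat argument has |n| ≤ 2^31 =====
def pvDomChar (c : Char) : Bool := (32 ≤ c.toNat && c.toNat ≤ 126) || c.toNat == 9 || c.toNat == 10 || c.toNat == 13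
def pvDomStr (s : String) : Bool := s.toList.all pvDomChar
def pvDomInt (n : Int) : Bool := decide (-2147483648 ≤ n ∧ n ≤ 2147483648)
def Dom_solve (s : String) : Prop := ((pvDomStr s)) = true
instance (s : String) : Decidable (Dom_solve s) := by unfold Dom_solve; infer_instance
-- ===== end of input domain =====

-- B replaces A's set-size uniqueness test by sort-then-adjacent-scan over the pair
-- representatives and walks the string two characters at a time instead of indexing s[2*i]
-- (objective: alternative, same cost class).


-- ===== PORT A =====
-- A's loop 'for i in range(m): if s[2*i] != s[2*i+1]: return "No"'; the indices are
-- provably in range for i in range(len(s)//2), so pyGet?.getD is exact here.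
def solveAPairs (cs : List Char) : List Int → Bool
  | [] => true
  | i :: rest =>
    if ((PySem.List.pyGet? cs (2 * i)).getD ' ' != (PySem.List.pyGet? cs (2 * i + 1)).getD ' ')
    then false
    else solveAPairs cs rest

def solve (s : String) : String :=
  let cs := s.toList
  if PySem.Int.mod (cs.length : Int) 2 == 1 then "No"
  else
    let m : Int := PySem.Int.floordiv (cs.length : Int) 2
    if solveAPairs cs (PySem.List.pyRange 0 m 1) = false then "No"
    else
      let odd_set : PySem.Set Char :=
        PySem.Set.ofList ((PySem.List.slice? cs none none 2).getD [])
      if ((odd_set.length : Int) < m) then "No" else "Yes"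

-- ===== PORT B =====
-- B's loop 'for a, b in zip(it, it): if a != b: return "No"; reps.append(a)':
-- two characters at a time; none = the early "No" return, some reps = the collected list.
def bReps : List Char → Option (List Char)
  | a :: b :: rest => if a != b then none else (bReps rest).map (fun r => a :: r)
  | _ => some []

-- B's scan 'for x, y in zip(reps, reps[1:]): if x == y: return "No"'
def adjDup : List Char → Bool
  | a :: b :: rest => if a == b then true else adjDup (b :: rest)
  | _ => false

def solve_alt (s : String) : String :=
  let cs := s.toList
  if cs.length % 2 == 1 then "No"
  else
    match bReps cs with
    | none => "No"
    | some reps =>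
      if adjDup (PySem.List.sorted reps (fun x => x) false) then "No" else "Yes"

-- ===== PRECONDITION & SPEC =====
def Spec_solve (s : String) (out : String) : Prop := out = solve_alt s
instance (s : String) (out : String) : Decidable (Spec_solve s out) := by unfold Spec_solve; infer_instance

-- ===== CLAIM (what is proved, stated in full; the proofs are below) =====
def Claim_equal_solve : Prop := ∀ (s : String), Dom_solve s → Spec_solve s (solve s)

-- ===== LEMMAS AND PROOFS =====

-- the even-index characters of a list (what s[::2] selects and what bReps collects)
def evens : List Char → List Char
  | a :: _ :: t => a :: evens t
  | [a] => [a]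
  | [] => []

theorem bReps_nil : bReps [] = some [] := rfl
theorem bReps_single (x : Char) : bReps [x] = some [] := rfl
theorem bReps_cons2 (a b : Char) (rest : List Char) :
    bReps (a :: b :: rest) = if a != b then none else (bReps rest).map (fun r => a :: r) := rfl

theorem solveAPairs_eq_all (cs : List Char) (is : List Int) :
    solveAPairs cs is =
      is.all (fun i =>
        (PySem.List.pyGet? cs (2 * i)).getD ' ' == (PySem.List.pyGet? cs (2 * i + 1)).getD ' ') := by
  induction is with
  | nil => rfl
  | cons i rest ih =>
    simp only [solveAPairs, List.all_cons, ih]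
    by_cases h : (PySem.List.pyGet? cs (2 * i)).getD ' ' = (PySem.List.pyGet? cs (2 * i + 1)).getD ' ' <;>
      simp [h]

theorem solveAPairs_true_iff (cs : List Char) (k : Nat) :
    solveAPairs cs (PySem.List.pyRange 0 (k : Int) 1) = true ↔
      ∀ j < k, cs.getD (2 * j) ' ' = cs.getD (2 * j + 1) ' ' := by
  rw [solveAPairs_eq_all, List.all_eq_true]
  constructor
  · intro h j hj
    have hmem := h (j : Int) (by rw [PySem.List.mem_pyRange_one]; omega)
    have e1 : (2 * (j : Int)) = ((2 * j : Nat) : Int) := by push_cast; ring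
    rw [e1, PySem.List.pyGet?_natCast] at hmem
    have e2 : (((2 * j : Nat) : Int) + 1) = ((2 * j + 1 : Nat) : Int) := by push_cast; ring
    rw [e2, PySem.List.pyGet?_natCast] at hmem
    simpa [List.getD_eq_getElem?_getD] using hmem
  · intro h i hi
    rw [PySem.List.mem_pyRange_one] at hi
    obtain ⟨j, rfl⟩ : ∃ j : Nat, i = (j : Int) := ⟨i.toNat, by omega⟩
    have hj : j < k := by omega
    have e1 : (2 * ((j : Nat) : Int)) = ((2 * j : Nat) : Int) := by push_cast; ring
    rw [e1, PySem.List.pyGet?_natCast]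
    have e2 : (((2 * j : Nat) : Int) + 1) = ((2 * j + 1 : Nat) : Int) := by push_cast; ring
    rw [e2, PySem.List.pyGet?_natCast]
    simpa [List.getD_eq_getElem?_getD] using h j hj

theorem bReps_none_iff (cs : List Char) :
    bReps cs = none ↔
      ∃ j, 2 * j + 1 < cs.length ∧ cs.getD (2 * j) ' ' ≠ cs.getD (2 * j + 1) ' ' := by
  induction cs using bReps.induct with
  | case1 a b rest hab =>
    rw [bne_iff_ne] at hab
    rw [bReps_cons2, if_pos (bne_iff_ne.2 hab)]
    simp only [true_iff]
    exact ⟨0, by simp, by simpa using hab⟩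
  | case2 a b rest hab ih =>
    have hab' : a = b := by simpa using hab
    subst hab'
    rw [bReps_cons2, if_neg hab]
    simp only [Option.map_eq_none_iff, ih]
    constructor
    · rintro ⟨j, hj, hne⟩
      refine ⟨j + 1, by simp; omega, ?_⟩
      have h2 : 2 * (j + 1) = (2 * j + 1) + 1 := by omega
      rw [h2]
      simpa [List.getD_cons_succ] using hne
    · rintro ⟨j, hj, hne⟩
      cases j with
      | zero => simp at hne
      | succ j =>
        refine ⟨j, by simp at hj; omega, ?_⟩
        have h2 : 2 * (j + 1) = (2 * j + 1) + 1 := by omega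
        rw [h2] at hne
        simpa [List.getD_cons_succ] using hne
  | case3 t ht =>
    rcases t with _ | ⟨x, _ | ⟨y, t⟩⟩
    · rw [bReps_nil]
      simp
    · rw [bReps_single]
      constructor
      · intro hc; cases hc
      · rintro ⟨j, hj, _⟩
        simp only [List.length_singleton] at hj
        omega
    · exact (ht x y t rfl).elim

theorem bReps_some (cs : List Char) (he : cs.length % 2 = 0) (r : List Char)
    (h : bReps cs = some r) : r = evens cs := by
  induction cs using bReps.induct generalizing r with
  | case1 a b rest hab =>
    rw [bReps_cons2, if_pos hab] at h
    simp at h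
  | case2 a b rest hab ih =>
    rw [bReps_cons2, if_neg hab] at h
    rw [Option.map_eq_some_iff] at h
    obtain ⟨r', hr', rfl⟩ := h
    have he' : rest.length % 2 = 0 := by simp at he; omega
    simp [evens, ih he' r' hr']
  | case3 t ht =>
    rcases t with _ | ⟨x, _ | ⟨y, t⟩⟩
    · rw [bReps_nil] at h; cases h; rfl
    · simp at he
    · exact (ht x y t rfl).elim

theorem length_evens (cs : List Char) : (evens cs).length = (cs.length + 1) / 2 := by
  induction cs using evens.induct with
  | case1 a b t ih => simp [evens, ih]; omega
  | case2 a => simp [evens]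
  | case3 => simp [evens]

theorem filterMap_evens (cs : List Char) :
    (List.range ((cs.length + 1) / 2)).filterMap (fun k => cs[2 * k]?) = evens cs := by
  induction cs using evens.induct with
  | case1 a b t ih =>
    have hc : ((a :: b :: t).length + 1) / 2 = (t.length + 1) / 2 + 1 := by
      simp only [List.length_cons]; omega
    rw [hc, List.range_succ_eq_map, List.filterMap_cons, List.filterMap_map]
    have hfun : (fun k => (a :: b :: t)[2 * k]?) ∘ Nat.succ = fun k => t[2 * k]? := by
      funext k
      simp only [Function.comp_apply]
      have h2 : 2 * Nat.succ k = (2 * k) + 1 + 1 := by omega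
      rw [h2]
      simp
    rw [hfun, ih]
    simp [evens]
  | case2 a =>
    norm_num [List.range_succ]
    simp [evens]
  | case3 => rfl

theorem slice2_eq_evens (cs : List Char) :
    PySem.List.slice? cs none none 2 = some (evens cs) := by
  rw [PySem.List.slice?]
  norm_num [PySem.List.sliceIndices]
  have hc : (if 0 < cs.length then (((cs.length : Int) + 2 - 1) / 2).toNat else 0)
      = (cs.length + 1) / 2 := by
    split <;> omega
  rw [hc]
  have hf : (fun x : Nat => cs[(2 * (x : Int)).toNat]?) = (fun k : Nat => cs[2 * k]?) := by
    funext k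
    have h2 : ((2 * (k : Int)).toNat) = 2 * k := by omega
    rw [h2]
  rw [hf, filterMap_evens]

theorem ofList_length_lt_iff (l : List Char) :
    (PySem.Set.ofList l).length < l.length ↔ ¬ l.Nodup := by
  constructor
  · intro h hn
    rw [PySem.Set.ofList_eq_self_of_nodup l hn] at h
    omega
  · intro hn
    have h1 : (PySem.Set.ofList l).length = (PySem.Set.ofList l).toFinset.card :=
      (List.toFinset_card_of_nodup (PySem.Set.nodup_ofList l)).symm
    have h2 : (PySem.Set.ofList l).toFinset = l.toFinset := by
      ext x
      simp [List.mem_toFinset, PySem.Set.mem_ofList]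
    have h3 : l.toFinset.card = l.dedup.length := List.card_toFinset l
    have h4 : l.dedup.Sublist l := List.dedup_sublist l
    have h5 : l.dedup ≠ l := fun he => hn (he ▸ l.nodup_dedup)
    have h6 : l.dedup.length < l.length := by
      rcases Nat.lt_or_ge l.dedup.length l.length with h | h
      · exact h
      · exact absurd (h4.eq_of_length (le_antisymm (h4.length_le) h)) h5
    have h7 : (PySem.Set.ofList l).length = l.dedup.length := by rw [h1, h2, h3]
    omega

theorem adjDup_false_iff (l : List Char) (hs : l.Pairwise (· ≤ ·)) :
    adjDup l = false ↔ l.Nodup := by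
  induction l using adjDup.induct with
  | case1 a b rest hab =>
    rw [beq_iff_eq] at hab
    subst hab
    simp only [adjDup, beq_self_eq_true, if_pos]
    constructor
    · intro h; cases h
    · intro h
      exfalso
      simp at h
  | case2 a b rest hab ih =>
    have hne : a ≠ b := by simpa using hab
    have hs' : (b :: rest).Pairwise (· ≤ ·) := hs.tail
    have hale : a ≤ b := (List.pairwise_cons.1 hs).1 b (by simp)
    have hblex : ∀ x ∈ rest, b ≤ x := (List.pairwise_cons.1 hs').1
    have hstep : adjDup (a :: b :: rest) = adjDup (b :: rest) := by
      simp only [adjDup]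
      rw [if_neg (by simpa using hne)]
    rw [hstep, ih hs']
    constructor
    · intro h
      refine List.nodup_cons.2 ⟨?_, h⟩
      intro hmem
      rcases List.mem_cons.1 hmem with rfl | hmem'
      · exact hne rfl
      · have hba : b ≤ a := hblex a hmem'
        have hab2 : a < b := lt_of_le_of_ne hale hne
        exact absurd hba (not_le.2 hab2)
    · intro h
      exact h.tail
  | case3 t ht =>
    rcases t with _ | ⟨x, _ | ⟨y, t⟩⟩
    · simp [adjDup]
    · simp [adjDup]
    · exact (ht x y t rfl).elim

theorem mod_cast_beq (n : Nat) :
    (PySem.Int.mod (n : Int) 2 == 1) = ((n % 2 == 1 : Bool)) := by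
  have hmod : PySem.Int.mod (n : Int) 2 = ((n % 2 : Nat) : Int) := by
    rw [PySem.Int.mod, Int.fmod_eq_emod, if_pos (Or.inl (by norm_num : (0:Int) ≤ 2))]
    omega
  rcases Nat.mod_two_eq_zero_or_one n with h0 | h0 <;> rw [hmod, h0] <;> decide

-- ===== VERDICT (by name: the statement is the Claim_ definition above) =====
theorem solve_spec : Claim_equal_solve := by
  intro s _
  unfold Spec_solve solve solve_alt
  dsimp only
  rw [mod_cast_beq]
  by_cases hodd : (s.toList.length % 2 == 1) = true
  · rw [if_pos hodd, if_pos hodd]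
  · rw [if_neg hodd, if_neg hodd]
    rw [beq_iff_eq] at hodd
    obtain ⟨k, hk⟩ : ∃ k, s.toList.length = 2 * k := ⟨s.toList.length / 2, by omega⟩
    have hm : PySem.Int.floordiv (s.toList.length : Int) 2 = (k : Int) := by
      rw [PySem.Int.floordiv, Int.fdiv_eq_ediv, if_pos (Or.inl (by norm_num : (0:Int) ≤ 2))]
      omega
    rw [hm]
    cases hb : bReps s.toList with
    | none =>
      obtain ⟨j, hj, hne⟩ := (bReps_none_iff s.toList).1 hb
      have hfalse : solveAPairs s.toList (PySem.List.pyRange 0 (k : Int) 1) = false := by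
        cases hAP : solveAPairs s.toList (PySem.List.pyRange 0 (k : Int) 1) with
        | false => rfl
        | true =>
          exact absurd ((solveAPairs_true_iff s.toList k).1 hAP j (by omega)) hne
      rw [if_pos hfalse]
    | some r =>
      have htrue : solveAPairs s.toList (PySem.List.pyRange 0 (k : Int) 1) = true := by
        rw [solveAPairs_true_iff]
        intro j hjk
        by_contra hne
        rw [(bReps_none_iff s.toList).2 ⟨j, by omega, hne⟩] at hb
        cases hb
      have hr : r = evens s.toList := bReps_some s.toList (by omega) r hb
      have hslice : (PySem.List.slice? s.toList none none 2).getD [] = evens s.toList := by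
        rw [slice2_eq_evens]
        rfl
      have hlen : (evens s.toList).length = k := by rw [length_evens]; omega
      have hpw : (PySem.List.sorted r (fun x => x) false).Pairwise (· ≤ ·) :=
        PySem.List.sorted_pairwise r (fun x => x)
      have hndiff : (PySem.List.sorted r (fun x => x) false).Nodup ↔ (evens s.toList).Nodup := by
        rw [(PySem.List.sorted_perm r (fun x => x) false).nodup_iff, hr]
      rw [htrue, hslice]
      by_cases hnd : (evens s.toList).Nodup
      · have hB : adjDup (PySem.List.sorted r (fun x => x) false) = false :=
          (adjDup_false_iff _ hpw).2 (hndiff.2 hnd)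
        have hA : ¬ (((PySem.Set.ofList (evens s.toList)).length : Int) < (k : Int)) := by
          have hge : ¬ ((PySem.Set.ofList (evens s.toList)).length < (evens s.toList).length) :=
            fun hlt => ((ofList_length_lt_iff _).1 hlt) hnd
          omega
        rw [if_neg (show ¬(true = false) by simp), if_neg hA]
        simp [hB]
      · have hB : adjDup (PySem.List.sorted r (fun x => x) false) = true := by
          cases hAD : adjDup (PySem.List.sorted r (fun x => x) false) with
          | true => rfl
          | false => exact absurd (hndiff.1 ((adjDup_false_iff _ hpw).1 hAD)) hnd
        have hA : ((PySem.Set.ofList (evens s.toList)).length : Int) < (k : Int) := by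
          have hlt : (PySem.Set.ofList (evens s.toList)).length < (evens s.toList).length :=
            (ofList_length_lt_iff _).2 hnd
          omega
        rw [if_neg (show ¬(true = false) by simp), if_pos hA]
        simp [hB]
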